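-- pv_equiv track=rewrite | github.com/Brandon-Valley/HQ_hack | HQ_Bot/solving/build_qo_properties.py | get_quoted_phrases
-- ===== SOURCE A (Python) =====
-- def get_quoted_phrases(question):
--     if question.count('"') < 2:
--         return []
--
--     quoted_phrases = []
--     split_q = question.split('"')
--
--     for q_piece_num, q_piece in enumerate(split_q):
--         if q_piece_num % 2 != 0: # if odd, b/c lists are 0 indexed
--             quoted_phrases.append(q_piece)
--     return quoted_phrases
-- ===== SOURCE B (Python) =====
-- def get_quoted_phrases(question):
--     if question.count('"') < 2:
--         return []
--     phrases = []
--     in_quote = False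
--     buf = []
--     for ch in question:
--         if ch == '"':
--             if in_quote:
--                 phrases.append(''.join(buf))
--                 buf = []
--             in_quote = not in_quote
--         elif in_quote:
--             buf.append(ch)
--     if in_quote:
--         phrases.append(''.join(buf))
--     return phrases
-- ===== Notes on version B (the rewrite author's own statement) =====
-- stated objective: alternative
-- what changed: B replaces A's split-on-quote-then-pick-odd-indexed-pieces pass with a single left-to-right character scan that toggles an in_quote flag and accumulates the current phrase in a buffer (flushing the buffer at end-of-string when a final quote is unmatched, which matches A's trailing-piece behaviour).
import Mathlib
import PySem

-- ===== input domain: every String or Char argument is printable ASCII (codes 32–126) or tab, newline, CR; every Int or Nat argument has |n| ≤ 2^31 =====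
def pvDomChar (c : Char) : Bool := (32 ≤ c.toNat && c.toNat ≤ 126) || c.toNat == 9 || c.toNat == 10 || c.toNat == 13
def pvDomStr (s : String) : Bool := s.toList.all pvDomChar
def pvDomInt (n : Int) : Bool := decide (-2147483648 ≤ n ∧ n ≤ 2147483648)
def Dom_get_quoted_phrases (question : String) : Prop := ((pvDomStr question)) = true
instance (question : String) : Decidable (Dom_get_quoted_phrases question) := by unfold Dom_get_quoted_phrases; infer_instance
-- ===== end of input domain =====

-- B replaces A's split-on-'"'/keep-odd-indexed-pieces pass by a single character scan with an
-- in_quote flag and a phrase buffer; same return value, proved equal on all inputs (alternative, not faster).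


-- ===== PORT A =====
-- if question.count('"') < 2: return []; split_q = question.split('"');
-- for q_piece_num, q_piece in enumerate(split_q): if q_piece_num % 2 != 0: quoted_phrases.append(q_piece)
def get_quoted_phrases (question : String) : List String :=
  if PySem.Str.count question "\"" < 2 then []
  else
    let split_q : List String := (PySem.Str.split? question "\"").getD []  -- sep "\"" ≠ "", so split? is always some here
    (PySem.List.enumerate split_q).foldl
      (fun quoted_phrases qp =>
        if PySem.Int.mod qp.1 2 ≠ 0 then quoted_phrases ++ [qp.2] else quoted_phrases) []

-- ===== PORT B =====
-- the for-loop of Source B: state (in_quote, buf, phrases); after the loop, flush buf if in_quote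
def scanB : List Char → Bool → List Char → List String → List String
  | [], inQ, buf, phrases => if inQ then phrases ++ [String.ofList buf] else phrases
  | c :: rest, inQ, buf, phrases =>
    if c = '"' then
      if inQ then scanB rest false [] (phrases ++ [String.ofList buf])
      else scanB rest true buf phrases
    else if inQ then scanB rest inQ (buf ++ [c]) phrases
    else scanB rest inQ buf phrases

def get_quoted_phrases_alt (question : String) : List String :=
  if PySem.Str.count question "\"" < 2 then []
  else scanB question.toList false [] []

-- ===== PRECONDITION & SPEC =====
def Spec_get_quoted_phrases (question : String) (out : List String) : Prop := out = get_quoted_phrases_alt question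
instance (question : String) (out : List String) : Decidable (Spec_get_quoted_phrases question out) := by unfold Spec_get_quoted_phrases; infer_instance

-- ===== CLAIM (what is proved, stated in full; the proofs are below) =====
def Claim_equal_get_quoted_phrases : Prop := ∀ (question : String), Dom_get_quoted_phrases question → Spec_get_quoted_phrases question (get_quoted_phrases question)

-- ===== LEMMAS AND PROOFS =====

/-- Splitting a char list on '"': first piece and the remaining pieces. -/
def splitChar : List Char → List Char × List (List Char)
  | [] => ([], [])
  | c :: rest =>
    let pr := splitChar rest
    if c = '"' then ([], pr.1 :: pr.2) else (c :: pr.1, pr.2)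

/-- Keep the elements at positions of the given parity (`true` = keep the head). -/
def pick {α : Type} : Bool → List α → List α
  | _, [] => []
  | b, x :: t => (if b then [x] else []) ++ pick (!b) t

theorem splitOn_go_eq (cs : List Char) : ∀ (fuel : Nat) (cur : List Char) (acc : List (List Char)),
    cs.length < fuel →
    PySem.Chars.splitOn.go ['"'] fuel cs cur acc
      = acc.reverse ++ (cur.reverse ++ (splitChar cs).1) :: (splitChar cs).2 := by
  induction cs with
  | nil =>
    intro fuel cur acc h
    match fuel, h with
    | fuel + 1, _ => simp [PySem.Chars.splitOn.go, splitChar]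
  | cons c rest ih =>
    intro fuel cur acc h
    match fuel, h with
    | fuel + 1, h =>
      rw [PySem.Chars.splitOn.go]
      by_cases hc : c = '"'
      · subst hc
        simp only [List.isPrefixOf, BEq.rfl, Bool.true_and, if_true,
          List.length_cons, List.drop_succ_cons, List.length_nil, List.drop_zero]
        rw [ih fuel [] (cur.reverse :: acc) (by simpa using Nat.lt_of_succ_lt_succ h)]
        simp [splitChar]
      · have hpre : (['"'].isPrefixOf (c :: rest)) = false := by
          simp [List.isPrefixOf]
          intro hq; exact absurd hq.symm hc
        simp only [hpre]
        rw [ih fuel (c :: cur) acc (by simpa using Nat.lt_of_succ_lt_succ h)]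
        simp [splitChar, hc]

theorem splitOn_eq (cs : List Char) :
    PySem.Chars.splitOn cs ['"'] = (splitChar cs).1 :: (splitChar cs).2 := by
  unfold PySem.Chars.splitOn
  rw [splitOn_go_eq cs (cs.length + 1) [] [] (by omega)]
  simp

theorem mod_two_flip (k : Int) : (PySem.Int.mod (k + 1) 2 ≠ 0) ↔ ¬ (PySem.Int.mod k 2 ≠ 0) := by
  show (k + 1).fmod 2 ≠ 0 ↔ ¬ k.fmod 2 ≠ 0
  rw [Int.fmod_eq_emod, Int.fmod_eq_emod]
  simp
  omega

theorem enum_foldl (l : List String) : ∀ (k : Int) (acc : List String),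
    (PySem.List.enumerate l k).foldl
        (fun quoted_phrases qp =>
          if PySem.Int.mod qp.1 2 ≠ 0 then quoted_phrases ++ [qp.2] else quoted_phrases) acc
      = acc ++ pick (decide (PySem.Int.mod k 2 ≠ 0)) l := by
  induction l with
  | nil => intro k acc; simp [PySem.List.enumerate, pick]
  | cons x t ih =>
    intro k acc
    rw [PySem.List.enumerate.eq_def]
    simp only [List.foldl_cons]
    rw [ih (k + 1)]
    have hflip : (decide (PySem.Int.mod (k + 1) 2 ≠ 0)) = !(decide (PySem.Int.mod k 2 ≠ 0)) := by
      rw [decide_eq_decide.mpr (mod_two_flip k), decide_not]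
    rw [hflip]
    by_cases h2 : k % 2 = 1 <;> simp [pick, h2]

theorem pick_map {α β : Type} (f : α → β) (l : List α) : ∀ b : Bool,
    pick b (l.map f) = (pick b l).map f := by
  induction l with
  | nil => intro b; simp [pick]
  | cons x t ih => intro b; cases b <;> simp [pick, ih]

theorem scanB_eq (cs : List Char) : ∀ (buf : List Char) (phrases : List String),
    (scanB cs false [] phrases
        = phrases ++ (pick true (splitChar cs).2).map String.ofList)
    ∧ (scanB cs true buf phrases
        = phrases ++ ((buf ++ (splitChar cs).1) :: pick false (splitChar cs).2).map String.ofList) := by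
  induction cs with
  | nil => intro buf phrases; simp [scanB, splitChar, pick]
  | cons c rest ih =>
    intro buf phrases
    by_cases hc : c = '"'
    · subst hc
      constructor
      · rw [scanB, if_pos rfl]
        simp only [Bool.false_eq_true, if_false]
        rw [(ih [] phrases).2]
        simp [splitChar, pick]
      · rw [scanB, if_pos rfl]
        simp only [if_true]
        rw [(ih [] (phrases ++ [String.ofList buf])).1]
        simp [splitChar, pick]
    · constructor
      · rw [scanB, if_neg hc]
        simp only [Bool.false_eq_true, if_false]
        rw [(ih [] phrases).1]
        simp [splitChar, hc]
      · rw [scanB, if_neg hc]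
        simp only [if_true]
        rw [(ih (buf ++ [c]) phrases).2]
        simp [splitChar, hc]

-- ===== VERDICT (by name: the statement is the Claim_ definition above) =====
theorem get_quoted_phrases_spec : Claim_equal_get_quoted_phrases := by
  intro question _
  unfold Spec_get_quoted_phrases get_quoted_phrases get_quoted_phrases_alt
  by_cases hguard : PySem.Str.count question "\"" < 2
  · rw [if_pos hguard, if_pos hguard]
  · rw [if_neg hguard, if_neg hguard]
    rw [(scanB_eq question.toList [] []).1]
    have hs : PySem.Str.split? question "\"" =
        some (((splitChar question.toList).1 :: (splitChar question.toList).2).map String.ofList) := by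
      unfold PySem.Str.split? PySem.Chars.split?
      simp [splitOn_eq]
    rw [hs]
    simp only [Option.getD_some]
    rw [enum_foldl]
    simp only [show PySem.Int.mod 0 2 = 0 from rfl]
    simp only [ne_eq, not_true_eq_false, decide_false]
    rw [pick_map]
    simp [pick]
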